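-- pv_equiv track=rewrite | github.com/AdaptivMCP/AdaptivMCP | github_mcp/workspace_tools/fs.py | _infer_eol_from_lines
-- ===== SOURCE A (Python) =====
-- def _infer_eol_from_lines(lines: list[str]) -> str:
--     """Infer an EOL sequence from an existing file.
--
--     Defaults to \n, but prefers \r\n when detected.
--     """
--
--     for line in lines:
--         if line.endswith("\r\n"):
--             return "\r\n"
--     for line in lines:
--         if line.endswith("\n"):
--             return "\n"
--     for line in lines:
--         if line.endswith("\r"):
--             return "\r"
--     return "\n"
-- ===== SOURCE B (Python) =====
-- def _infer_eol_from_lines(lines: list[str]) -> str: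
--     has_crlf = has_lf = has_cr = False
--     for line in lines:
--         has_crlf = has_crlf or line.endswith("\r\n")
--         has_lf = has_lf or line.endswith("\n")
--         has_cr = has_cr or line.endswith("\r")
--     if has_crlf:
--         return "\r\n"
--     if has_lf:
--         return "\n"
--     if has_cr:
--         return "\r"
--     return "\n"
-- ===== Notes on version B (the rewrite author's own statement) =====
-- stated objective: simpler
-- what changed: Replaces A's three sequential early-return scans over the list with a single pass that accumulates three boolean flags and decides the priority once at the end.
import Mathlib
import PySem

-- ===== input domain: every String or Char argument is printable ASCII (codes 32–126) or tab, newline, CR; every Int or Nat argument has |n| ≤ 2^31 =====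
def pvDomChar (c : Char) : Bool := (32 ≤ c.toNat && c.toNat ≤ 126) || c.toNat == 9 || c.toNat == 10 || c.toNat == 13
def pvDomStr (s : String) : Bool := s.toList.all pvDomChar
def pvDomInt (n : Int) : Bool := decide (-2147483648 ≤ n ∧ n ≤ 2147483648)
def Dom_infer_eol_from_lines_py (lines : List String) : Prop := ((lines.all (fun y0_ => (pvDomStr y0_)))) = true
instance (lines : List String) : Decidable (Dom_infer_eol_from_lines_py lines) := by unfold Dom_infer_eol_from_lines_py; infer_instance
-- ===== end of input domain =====

-- B infers the EOL in one pass with three boolean flags instead of A's three sequential scans (same result; objective: simpler).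


-- ===== PORT A =====
-- each early-return 'for' loop of A becomes one structural scan returning true on the first match
def aScan (lines : List String) (suf : String) : Bool :=
  match lines with
  | [] => false
  | l :: ls => if PySem.Str.endswith l suf then true else aScan ls suf

def infer_eol_from_lines_py (lines : List String) : String :=
  if aScan lines "\r\n" then "\r\n"
  else if aScan lines "\n" then "\n"
  else if aScan lines "\r" then "\r"
  else "\n"

-- ===== PORT B =====
def infer_eol_from_lines_py_alt (lines : List String) : String :=
  let flags := lines.foldl
    (fun (f : Bool × Bool × Bool) l =>
      (f.1 || PySem.Str.endswith l "\r\n",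
       f.2.1 || PySem.Str.endswith l "\n",
       f.2.2 || PySem.Str.endswith l "\r"))
    (false, false, false)
  if flags.1 then "\r\n"
  else if flags.2.1 then "\n"
  else if flags.2.2 then "\r"
  else "\n"

-- ===== PRECONDITION & SPEC =====
def Spec_infer_eol_from_lines_py (lines : List String) (out : String) : Prop := out = infer_eol_from_lines_py_alt lines
instance (lines : List String) (out : String) : Decidable (Spec_infer_eol_from_lines_py lines out) := by unfold Spec_infer_eol_from_lines_py; infer_instance

-- ===== CLAIM =====
def Claim_equal_infer_eol_from_lines_py : Prop := ∀ (lines : List String), Dom_infer_eol_from_lines_py lines → Spec_infer_eol_from_lines_py lines (infer_eol_from_lines_py lines)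

-- ===== LEMMAS AND PROOFS =====
theorem aScan_eq_any (lines : List String) (suf : String) :
    aScan lines suf = lines.any (fun l => PySem.Str.endswith l suf) := by
  induction lines with
  | nil => rfl
  | cons l ls ih => by_cases h : PySem.Str.endswith l suf <;> simp [aScan, ih, h]

theorem flags_eq (lines : List String) (a b c : Bool) :
    lines.foldl
      (fun (f : Bool × Bool × Bool) l =>
        (f.1 || PySem.Str.endswith l "\r\n",
         f.2.1 || PySem.Str.endswith l "\n",
         f.2.2 || PySem.Str.endswith l "\r"))
      (a, b, c)
    = (a || lines.any (fun l => PySem.Str.endswith l "\r\n"),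
       b || lines.any (fun l => PySem.Str.endswith l "\n"),
       c || lines.any (fun l => PySem.Str.endswith l "\r")) := by
  induction lines generalizing a b c with
  | nil => simp
  | cons l ls ih => rw [List.foldl_cons, ih]; simp [Bool.or_assoc]

-- ===== VERDICT =====
theorem infer_eol_from_lines_py_spec : Claim_equal_infer_eol_from_lines_py := by
  intro lines _
  unfold Spec_infer_eol_from_lines_py infer_eol_from_lines_py infer_eol_from_lines_py_alt
  simp only [flags_eq, aScan_eq_any, Bool.false_or]
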